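-- pv_equiv track=rewrite | github.com/LesleyClancy/Uni-Aurapose | automation/daily_change_report.py | compare_snapshots
-- ===== SOURCE A (Python) =====
-- from typing import Dict, Iterable, List, Tuple
--
-- def compare_snapshots(
--     old_snapshot: Dict[str, dict],
--     new_snapshot: Dict[str, dict],
-- ) -> Tuple[List[str], List[str], List[str]]:
--     old_paths = set(old_snapshot)
--     new_paths = set(new_snapshot)
--
--     added = sorted(new_paths - old_paths)
--     deleted = sorted(old_paths - new_paths)
--     modified = sorted(
--         path
--         for path in (old_paths & new_paths)
--         if old_snapshot[path].get("sha256") != new_snapshot[path].get("sha256")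
--     )
--     return added, modified, deleted
-- ===== SOURCE B (Python) =====
-- from typing import Dict, List, Tuple
--
-- def compare_snapshots(
--     old_snapshot: Dict[str, dict],
--     new_snapshot: Dict[str, dict],
-- ) -> Tuple[List[str], List[str], List[str]]:
--     # Sort both snapshots by path once, then classify with a two-pointer merge:
--     # the three result lists come out already in sorted order, no set algebra.
--     olds = sorted(old_snapshot.items(), key=lambda kv: kv[0])
--     news = sorted(new_snapshot.items(), key=lambda kv: kv[0])
--     added: List[str] = []
--     modified: List[str] = []
--     deleted: List[str] = []
--     i = j = 0
--     while i < len(olds) and j < len(news):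
--         ko, mo = olds[i]
--         kn, mn = news[j]
--         if ko == kn:
--             if mo.get("sha256") != mn.get("sha256"):
--                 modified.append(ko)
--             i += 1
--             j += 1
--         elif ko < kn:
--             deleted.append(ko)
--             i += 1
--         else:
--             added.append(kn)
--             j += 1
--     deleted.extend(k for k, _ in olds[i:])
--     added.extend(k for k, _ in news[j:])
--     return added, modified, deleted
-- ===== Notes on version B (the rewrite author's own statement) =====
-- stated objective: alternative
-- what changed: Replaces the set-algebra pipeline (build two key sets, take two set differences and a filtered intersection, sort each result) by a sort-then-merge algorithm: both snapshots are sorted by path once and a single two-pointer merge over the two sorted item lists emits added/modified/deleted already in sorted order, with no sets, no membership tests and no final sorts.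
import Mathlib
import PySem

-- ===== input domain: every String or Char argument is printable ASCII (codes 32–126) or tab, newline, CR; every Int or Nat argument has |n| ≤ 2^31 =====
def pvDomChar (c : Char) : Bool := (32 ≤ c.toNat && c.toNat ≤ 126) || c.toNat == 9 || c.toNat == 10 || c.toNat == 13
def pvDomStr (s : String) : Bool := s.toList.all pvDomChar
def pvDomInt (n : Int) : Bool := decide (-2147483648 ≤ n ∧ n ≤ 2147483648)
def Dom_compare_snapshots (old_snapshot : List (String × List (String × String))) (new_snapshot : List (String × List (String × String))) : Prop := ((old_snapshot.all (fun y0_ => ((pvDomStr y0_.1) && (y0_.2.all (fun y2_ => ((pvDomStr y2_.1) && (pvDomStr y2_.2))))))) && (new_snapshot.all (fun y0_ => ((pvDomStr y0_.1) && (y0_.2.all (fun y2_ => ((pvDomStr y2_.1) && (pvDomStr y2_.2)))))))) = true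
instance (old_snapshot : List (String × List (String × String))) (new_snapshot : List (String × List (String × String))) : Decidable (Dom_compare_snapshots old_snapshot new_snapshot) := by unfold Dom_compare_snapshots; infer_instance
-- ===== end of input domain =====

-- B replaces A's set algebra (two set differences + filtered intersection, each sorted at
-- the end) by sorting both snapshots by path once and classifying with a two-pointer merge
-- that emits the three lists already in sorted order (objective: alternative).

-- ===== PORT A =====
def compare_snapshots (old_snapshot : List (String × List (String × String))) (new_snapshot : List (String × List (String × String))) : List String × List String × List String :=
  let old_paths : PySem.Set String := PySem.Set.ofList (old_snapshot.map (fun p => p.1))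
  let new_paths : PySem.Set String := PySem.Set.ofList (new_snapshot.map (fun p => p.1))
  let added := PySem.List.sorted (PySem.Set.diff new_paths old_paths) (fun x => x)
  let deleted := PySem.List.sorted (PySem.Set.diff old_paths new_paths) (fun x => x)
  let modified := PySem.List.sorted
    ((PySem.Set.inter old_paths new_paths).filter (fun path =>
      ((PySem.Dict.mk ((PySem.Dict.mk old_snapshot).getD path [])).get? "sha256")
        != ((PySem.Dict.mk ((PySem.Dict.mk new_snapshot).getD path [])).get? "sha256")))
    (fun x => x)
  (added, modified, deleted)

-- ===== PORT B =====
-- meta.get("sha256") of Source B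
def pvSha (m : List (String × String)) : Option String := (PySem.Dict.mk m).get? "sha256"

-- the while loop of Source B (two-pointer merge over the two key-sorted item lists) together
-- with the two trailing extends; the recursion conses in the same order the loop appends
def pvMerge : List (String × List (String × String)) → List (String × List (String × String)) → List String × List String × List String
  | [], news => (news.map (fun p => p.1), [], [])
  | (ko, mo) :: ot, [] => ([], [], ((ko, mo) :: ot).map (fun p => p.1))
  | (ko, mo) :: ot, (kn, mn) :: nt =>
    if ko == kn then
      let r := pvMerge ot nt
      if pvSha mo != pvSha mn then (r.1, ko :: r.2.1, r.2.2) else r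
    else if ko < kn then
      let r := pvMerge ot ((kn, mn) :: nt)
      (r.1, r.2.1, ko :: r.2.2)
    else
      let r := pvMerge ((ko, mo) :: ot) nt
      (kn :: r.1, r.2.1, r.2.2)
termination_by o n => o.length + n.length

def compare_snapshots_alt (old_snapshot : List (String × List (String × String))) (new_snapshot : List (String × List (String × String))) : List String × List String × List String :=
  let olds := PySem.List.sorted old_snapshot (fun kv => kv.1)
  let news := PySem.List.sorted new_snapshot (fun kv => kv.1)
  pvMerge olds news

-- ===== PRECONDITION & SPEC =====
-- Pre_ requires the key lists to be duplicate-free: a Python dict cannot contain duplicate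
-- keys, so this only restricts the association-list encoding to faithful dict encodings.
def Pre_compare_snapshots (old_snapshot : List (String × List (String × String))) (new_snapshot : List (String × List (String × String))) : Prop :=
  (old_snapshot.map (fun p => p.1)).Nodup ∧ (new_snapshot.map (fun p => p.1)).Nodup
instance (old_snapshot : List (String × List (String × String))) (new_snapshot : List (String × List (String × String))) : Decidable (Pre_compare_snapshots old_snapshot new_snapshot) := by unfold Pre_compare_snapshots; infer_instance
def pvWitness_compare_snapshots : (List (String × List (String × String))) × (List (String × List (String × String))) :=
  ([("a", [("sha256", "1")]), ("b", [("sha256", "2")])], [("b", [("sha256", "3")]), ("c", [])])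
def Spec_compare_snapshots (old_snapshot : List (String × List (String × String))) (new_snapshot : List (String × List (String × String))) (out : List String × List String × List String) : Prop := out = compare_snapshots_alt old_snapshot new_snapshot
instance (old_snapshot : List (String × List (String × String))) (new_snapshot : List (String × List (String × String))) (out : List String × List String × List String) : Decidable (Spec_compare_snapshots old_snapshot new_snapshot out) := by unfold Spec_compare_snapshots; infer_instance

-- ===== CLAIM (what is proved, stated in full; the proofs are below) =====
def Claim_equal_compare_snapshots : Prop := ∀ (old_snapshot : List (String × List (String × String))) (new_snapshot : List (String × List (String × String))), Dom_compare_snapshots old_snapshot new_snapshot → Pre_compare_snapshots old_snapshot new_snapshot → Spec_compare_snapshots old_snapshot new_snapshot (compare_snapshots old_snapshot new_snapshot)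

-- ===== LEMMAS AND PROOFS =====

-- proof-side association lookup (first match), used only to characterise pvMerge
def pvFind (l : List (String × List (String × String))) (k : String) : Option (List (String × String)) :=
  match l with
  | [] => none
  | (a, b) :: t => if a == k then some b else pvFind t k

theorem pvFind_eq_none_iff (l : List (String × List (String × String))) (k : String) :
    pvFind l k = none ↔ k ∉ l.map (fun p => p.1) := by
  induction l with
  | nil => simp [pvFind]
  | cons hd tl ih =>
    obtain ⟨a, b⟩ := hd
    by_cases h : a = k
    · simp [pvFind, h]
    · simp [pvFind, h, ih, Ne.symm h]

theorem pvFind_cons_ne (a : String) (b : List (String × String))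
    (t : List (String × List (String × String))) (k : String) (h : a ≠ k) :
    pvFind ((a, b) :: t) k = pvFind t k := by
  simp [pvFind, h]

theorem pvFind_mem (l : List (String × List (String × String))) (k : String)
    (v : List (String × String)) (h : pvFind l k = some v) : (k, v) ∈ l := by
  induction l with
  | nil => simp [pvFind] at h
  | cons hd tl ih =>
    obtain ⟨a, b⟩ := hd
    by_cases ha : a = k
    · subst ha; simp [pvFind] at h; simp [h]
    · rw [pvFind_cons_ne a b tl k ha] at h
      exact List.mem_cons_of_mem _ (ih h)

-- predicates the merge realises
def pvPadd (olds : List (String × List (String × String))) (p : String × List (String × String)) : Bool :=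
  (pvFind olds p.1).isNone
def pvPmod (olds : List (String × List (String × String))) (p : String × List (String × String)) : Bool :=
  match pvFind olds p.1 with
  | some mo => pvSha mo != pvSha p.2
  | none => false
def pvPdel (news : List (String × List (String × String))) (p : String × List (String × String)) : Bool :=
  (pvFind news p.1).isNone

theorem pvMerge_eq (olds news : List (String × List (String × String)))
    (ho : (olds.map (fun p => p.1)).Pairwise (· < ·))
    (hn : (news.map (fun p => p.1)).Pairwise (· < ·)) :
    pvMerge olds news =
      ((news.filter (pvPadd olds)).map (fun p => p.1),
       (news.filter (pvPmod olds)).map (fun p => p.1),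
       (olds.filter (pvPdel news)).map (fun p => p.1)) := by
  fun_induction pvMerge olds news with
  | case1 news =>
    have h1 : List.filter (pvPadd []) news = news :=
      List.filter_eq_self.mpr (fun p _ => by simp [pvPadd, pvFind])
    have h2 : List.filter (pvPmod []) news = [] :=
      List.filter_eq_nil_iff.mpr (fun p _ => by simp [pvPmod, pvFind])
    simp [h1, h2]
  | case2 ko mo ot =>
    have h1 : List.filter (pvPdel []) ((ko, mo) :: ot) = (ko, mo) :: ot :=
      List.filter_eq_self.mpr (fun p _ => by simp [pvPdel, pvFind])
    simp [h1]
  | case3 ko mo ot kn mn nt heq r hs ih =>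
    simp only [List.map_cons, List.pairwise_cons] at ho hn
    have hko : ko = kn := by simpa using heq
    subst hko
    have hot : ∀ p ∈ ot, ko < p.1 := fun p hp => ho.1 p.1 (List.mem_map_of_mem hp)
    have hnt : ∀ p ∈ nt, ko < p.1 := fun p hp => hn.1 p.1 (List.mem_map_of_mem hp)
    have hadd : List.filter (pvPadd ((ko, mo) :: ot)) nt = List.filter (pvPadd ot) nt :=
      List.filter_congr (fun p hp => by
        simp [pvPadd, pvFind_cons_ne ko mo ot p.1 (ne_of_lt (hnt p hp))])
    have hmod : List.filter (pvPmod ((ko, mo) :: ot)) nt = List.filter (pvPmod ot) nt :=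
      List.filter_congr (fun p hp => by
        simp [pvPmod, pvFind_cons_ne ko mo ot p.1 (ne_of_lt (hnt p hp))])
    have hdel : List.filter (pvPdel ((ko, mn) :: nt)) ot = List.filter (pvPdel nt) ot :=
      List.filter_congr (fun p hp => by
        simp [pvPdel, pvFind_cons_ne ko mn nt p.1 (ne_of_lt (hot p hp))])
    have hheadA : pvPadd ((ko, mo) :: ot) (ko, mn) = false := by simp [pvPadd, pvFind]
    have hheadM : pvPmod ((ko, mo) :: ot) (ko, mn) = true := by simp [pvPmod, pvFind, hs]
    have hheadD : pvPdel ((ko, mn) :: nt) (ko, mo) = false := by simp [pvPdel, pvFind]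
    simp only [r] at *
    rw [ih ho.2 hn.2]
    simp [hheadA, hheadM, hheadD, hadd, hmod, hdel]
  | case4 ko mo ot kn mn nt heq r hs ih =>
    simp only [List.map_cons, List.pairwise_cons] at ho hn
    have hko : ko = kn := by simpa using heq
    subst hko
    have hot : ∀ p ∈ ot, ko < p.1 := fun p hp => ho.1 p.1 (List.mem_map_of_mem hp)
    have hnt : ∀ p ∈ nt, ko < p.1 := fun p hp => hn.1 p.1 (List.mem_map_of_mem hp)
    have hadd : List.filter (pvPadd ((ko, mo) :: ot)) nt = List.filter (pvPadd ot) nt :=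
      List.filter_congr (fun p hp => by
        simp [pvPadd, pvFind_cons_ne ko mo ot p.1 (ne_of_lt (hnt p hp))])
    have hmod : List.filter (pvPmod ((ko, mo) :: ot)) nt = List.filter (pvPmod ot) nt :=
      List.filter_congr (fun p hp => by
        simp [pvPmod, pvFind_cons_ne ko mo ot p.1 (ne_of_lt (hnt p hp))])
    have hdel : List.filter (pvPdel ((ko, mn) :: nt)) ot = List.filter (pvPdel nt) ot :=
      List.filter_congr (fun p hp => by
        simp [pvPdel, pvFind_cons_ne ko mn nt p.1 (ne_of_lt (hot p hp))])
    have hheadA : pvPadd ((ko, mo) :: ot) (ko, mn) = false := by simp [pvPadd, pvFind]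
    have hheadM : pvPmod ((ko, mo) :: ot) (ko, mn) = false := by
      simp only [Bool.not_eq_true] at hs
      simp [pvPmod, pvFind, hs]
    have hheadD : pvPdel ((ko, mn) :: nt) (ko, mo) = false := by simp [pvPdel, pvFind]
    simp only [r] at *
    rw [ih ho.2 hn.2]
    simp [hheadA, hheadM, hheadD, hadd, hmod, hdel]
  | case5 ko mo ot kn mn nt hne hlt r ih =>
    simp only [List.map_cons, List.pairwise_cons] at ho hn
    have hot : ∀ p ∈ ot, ko < p.1 := fun p hp => ho.1 p.1 (List.mem_map_of_mem hp)
    have hnall : ∀ p ∈ (kn, mn) :: nt, ko < p.1 := by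
      intro p hp
      rcases List.mem_cons.mp hp with h | h
      · subst h; exact hlt
      · exact lt_trans hlt (hn.1 p.1 (List.mem_map_of_mem h))
    have hadd : List.filter (pvPadd ((ko, mo) :: ot)) ((kn, mn) :: nt)
        = List.filter (pvPadd ot) ((kn, mn) :: nt) :=
      List.filter_congr (fun p hp => by
        simp [pvPadd, pvFind_cons_ne ko mo ot p.1 (ne_of_lt (hnall p hp))])
    have hmod : List.filter (pvPmod ((ko, mo) :: ot)) ((kn, mn) :: nt)
        = List.filter (pvPmod ot) ((kn, mn) :: nt) :=
      List.filter_congr (fun p hp => by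
        simp [pvPmod, pvFind_cons_ne ko mo ot p.1 (ne_of_lt (hnall p hp))])
    have hheadD : pvPdel ((kn, mn) :: nt) (ko, mo) = true := by
      simp only [pvPdel]
      rw [pvFind_cons_ne kn mn nt ko (ne_of_gt hlt), Option.isNone_iff_eq_none,
        pvFind_eq_none_iff]
      intro hmem
      obtain ⟨p, hp, hpk⟩ := List.mem_map.mp hmem
      exact absurd hpk (ne_of_gt (lt_trans hlt (hn.1 p.1 (List.mem_map_of_mem hp))))
    simp only [r] at *
    rw [ih ho.2 (by simp only [List.map_cons, List.pairwise_cons]; exact hn)]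
    simp [List.filter_cons, hheadD, hadd, hmod]
  | case6 ko mo ot kn mn nt hne hnlt r ih =>
    simp only [List.map_cons, List.pairwise_cons] at hn
    have hko : ko ≠ kn := by simpa using hne
    have hgt : kn < ko := lt_of_le_of_ne (not_lt.mp hnlt) (Ne.symm hko)
    have hoall : ∀ p ∈ (ko, mo) :: ot, kn < p.1 := by
      intro p hp
      simp only [List.map_cons, List.pairwise_cons] at ho
      rcases List.mem_cons.mp hp with h | h
      · subst h; exact hgt
      · exact lt_trans hgt (ho.1 p.1 (List.mem_map_of_mem h))
    have hdel : List.filter (pvPdel ((kn, mn) :: nt)) ((ko, mo) :: ot)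
        = List.filter (pvPdel nt) ((ko, mo) :: ot) :=
      List.filter_congr (fun p hp => by
        simp [pvPdel, pvFind_cons_ne kn mn nt p.1 (ne_of_lt (hoall p hp))])
    have hfnone : pvFind ((ko, mo) :: ot) kn = none := by
      rw [pvFind_eq_none_iff]
      intro hmem
      obtain ⟨p, hp, hpk⟩ := List.mem_map.mp hmem
      exact absurd hpk (ne_of_gt (hoall p hp))
    have hheadA : pvPadd ((ko, mo) :: ot) (kn, mn) = true := by
      simp [pvPadd, hfnone]
    have hheadM : pvPmod ((ko, mo) :: ot) (kn, mn) = false := by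
      simp [pvPmod, hfnone]
    simp only [r] at *
    rw [ih ho hn.2]
    simp [List.filter_cons, hheadA, hheadM, hdel]

theorem pvGetD_mk_of_mem (l : List (String × List (String × String))) {k : String}
    {v : List (String × String)} (h : (k, v) ∈ l) (hnd : (l.map (fun p => p.1)).Nodup) :
    (PySem.Dict.mk l).getD k [] = v := by
  apply PySem.Dict.getD_of_mem_items (d := PySem.Dict.mk l) h
  simpa [PySem.Dict.keys_mk] using hnd

theorem compare_snapshots_spec : Claim_equal_compare_snapshots := by
  intro old_snapshot new_snapshot _ hpre
  obtain ⟨hOld, hNew⟩ := hpre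
  unfold Spec_compare_snapshots compare_snapshots compare_snapshots_alt
  set so := PySem.List.sorted old_snapshot (fun kv => kv.1) with hso
  set sn := PySem.List.sorted new_snapshot (fun kv => kv.1) with hsn
  have hsoPerm : so.Perm old_snapshot := PySem.List.sorted_perm _ _ _
  have hsnPerm : sn.Perm new_snapshot := PySem.List.sorted_perm _ _ _
  have hsoKeys : (so.map (fun p => p.1)).Perm (old_snapshot.map (fun p => p.1)) := hsoPerm.map _
  have hsnKeys : (sn.map (fun p => p.1)).Perm (new_snapshot.map (fun p => p.1)) := hsnPerm.map _
  have hsoNd : (so.map (fun p => p.1)).Nodup := hsoKeys.nodup_iff.mpr hOld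
  have hsnNd : (sn.map (fun p => p.1)).Nodup := hsnKeys.nodup_iff.mpr hNew
  have hsoLt : (so.map (fun p => p.1)).Pairwise (· < ·) := by
    have hle := PySem.List.sorted_map_key_pairwise (xs := old_snapshot) (key := fun kv => kv.1)
    exact List.Pairwise.imp₂ (fun a b hab hne => lt_of_le_of_ne hab hne) hle hsoNd
  have hsnLt : (sn.map (fun p => p.1)).Pairwise (· < ·) := by
    have hle := PySem.List.sorted_map_key_pairwise (xs := new_snapshot) (key := fun kv => kv.1)
    exact List.Pairwise.imp₂ (fun a b hab hne => lt_of_le_of_ne hab hne) hle hsnNd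
  rw [pvMerge_eq so sn hsoLt hsnLt]
  have hFindSo : ∀ k, pvFind so k = none ↔ k ∉ old_snapshot.map (fun p => p.1) := by
    intro k; rw [pvFind_eq_none_iff]; exact not_congr hsoKeys.mem_iff
  have hFindSn : ∀ k, pvFind sn k = none ↔ k ∉ new_snapshot.map (fun p => p.1) := by
    intro k; rw [pvFind_eq_none_iff]; exact not_congr hsnKeys.mem_iff
  refine Prod.ext ?_ (Prod.ext ?_ ?_)
  · -- added
    apply PySem.List.sorted_eq_of_perm_of_pairwise_lt
    · rw [List.perm_ext_iff_of_nodup]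
      · intro k
        simp only [List.mem_map, List.mem_filter, pvPadd, Option.isNone_iff_eq_none,
          PySem.Set.diff, List.mem_filter, PySem.Set.mem_ofList,
          Bool.not_eq_eq_eq_not, Bool.not_true]
        constructor
        · rintro ⟨p, ⟨hp, hnone⟩, rfl⟩
          rw [hFindSo] at hnone
          refine ⟨?_, by simpa [PySem.Set.contains_iff, PySem.Set.mem_ofList] using hnone⟩
          exact ⟨p, hsnPerm.mem_iff.mp hp, rfl⟩
        · rintro ⟨hknew, hcont⟩
          obtain ⟨p, hp, rfl⟩ := hknew
          refine ⟨p, ⟨hsnPerm.mem_iff.mpr hp, ?_⟩, rfl⟩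
          rw [hFindSo]
          simpa [PySem.Set.contains_iff, PySem.Set.mem_ofList] using hcont
      · exact List.Nodup.sublist (List.Sublist.map _ (List.filter_sublist (l := sn))) hsnNd
      · exact ((PySem.Set.nodup_ofList _).filter _)
    · exact hsnLt.sublist (List.Sublist.map _ (List.filter_sublist (l := sn)))
  · -- modified
    apply PySem.List.sorted_eq_of_perm_of_pairwise_lt
    · rw [List.perm_ext_iff_of_nodup]
      · intro k
        constructor
        · intro hk
          obtain ⟨p, hpf, rfl⟩ := List.mem_map.mp hk
          obtain ⟨hp, hcond⟩ := List.mem_filter.mp hpf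
          simp only [pvPmod] at hcond
          cases hmo : pvFind so p.1 with
          | none => rw [hmo] at hcond; simp at hcond
          | some mo =>
            rw [hmo] at hcond
            have hmoMem : (p.1, mo) ∈ old_snapshot := hsoPerm.mem_iff.mp (pvFind_mem so p.1 mo hmo)
            have hpMem : p ∈ new_snapshot := hsnPerm.mem_iff.mp hp
            have hgo : (PySem.Dict.mk old_snapshot).getD p.1 [] = mo :=
              pvGetD_mk_of_mem old_snapshot hmoMem hOld
            have hgn : (PySem.Dict.mk new_snapshot).getD p.1 [] = p.2 :=
              pvGetD_mk_of_mem new_snapshot (by simpa using hpMem) hNew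
            refine List.mem_filter.mpr ⟨?_, ?_⟩
            · rw [PySem.Set.mem_inter]
              constructor
              · rw [PySem.Set.mem_ofList]
                exact List.mem_map.mpr ⟨(p.1, mo), hmoMem, rfl⟩
              · rw [PySem.Set.mem_ofList]
                exact List.mem_map.mpr ⟨p, hpMem, rfl⟩
            · rw [hgo, hgn]
              simpa [pvSha] using hcond
        · intro hk
          obtain ⟨hkint, hcond⟩ := List.mem_filter.mp hk
          rw [PySem.Set.mem_inter, PySem.Set.mem_ofList, PySem.Set.mem_ofList] at hkint
          obtain ⟨hkold, hknew⟩ := hkint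
          obtain ⟨p, hp, rfl⟩ := List.mem_map.mp hknew
          refine List.mem_map.mpr ⟨p, List.mem_filter.mpr ⟨hsnPerm.mem_iff.mpr hp, ?_⟩, rfl⟩
          simp only [pvPmod]
          cases hmo : pvFind so p.1 with
          | none =>
            rw [pvFind_eq_none_iff] at hmo
            exact absurd (hsoKeys.mem_iff.mpr hkold) hmo
          | some mo =>
            have hmoMem : (p.1, mo) ∈ old_snapshot := hsoPerm.mem_iff.mp (pvFind_mem so p.1 mo hmo)
            have hgo : (PySem.Dict.mk old_snapshot).getD p.1 [] = mo :=
              pvGetD_mk_of_mem old_snapshot hmoMem hOld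
            have hgn : (PySem.Dict.mk new_snapshot).getD p.1 [] = p.2 :=
              pvGetD_mk_of_mem new_snapshot (by simpa using hp) hNew
            rw [hgo, hgn] at hcond
            simpa [pvSha] using hcond
      · exact List.Nodup.sublist (List.Sublist.map _ (List.filter_sublist (l := sn))) hsnNd
      · exact ((PySem.Set.nodup_inter _ _ (PySem.Set.nodup_ofList _)).filter _)
    · exact hsnLt.sublist (List.Sublist.map _ (List.filter_sublist (l := sn)))
  · -- deleted
    apply PySem.List.sorted_eq_of_perm_of_pairwise_lt
    · rw [List.perm_ext_iff_of_nodup]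
      · intro k
        simp only [List.mem_map, List.mem_filter, pvPdel, Option.isNone_iff_eq_none,
          PySem.Set.diff, List.mem_filter, PySem.Set.mem_ofList,
          Bool.not_eq_eq_eq_not, Bool.not_true]
        constructor
        · rintro ⟨p, ⟨hp, hnone⟩, rfl⟩
          rw [hFindSn] at hnone
          refine ⟨?_, by simpa [PySem.Set.contains_iff, PySem.Set.mem_ofList] using hnone⟩
          exact ⟨p, hsoPerm.mem_iff.mp hp, rfl⟩
        · rintro ⟨hkold, hcont⟩
          obtain ⟨p, hp, rfl⟩ := hkold
          refine ⟨p, ⟨hsoPerm.mem_iff.mpr hp, ?_⟩, rfl⟩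
          rw [hFindSn]
          simpa [PySem.Set.contains_iff, PySem.Set.mem_ofList] using hcont
      · exact List.Nodup.sublist (List.Sublist.map _ (List.filter_sublist (l := so))) hsoNd
      · exact ((PySem.Set.nodup_ofList _).filter _)
    · exact hsoLt.sublist (List.Sublist.map _ (List.filter_sublist (l := so)))
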